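-- pv_equiv track=rewrite | github.com/Eole30/MorpiontGeant | Check_game.py | get_next_box
-- ===== SOURCE A (Python) =====
-- def get_next_box(x,y):
--     #coint haut gauche
--     for i in range(0,7,3):
--         for j in range(0,7,3):
--             if (x,y) == (i,j):
--                 possible_move = []
--                 for k in range(3):
--                     for h in range(3):
--                         possible_move.append([h,k])
--                 return possible_move
--
--     #coint haut milleux
--     for i in range(0,7,3):
--         for j in range(1,8,3):
--             if (x,y) == (i,j):
--                 possible_move = []
--                 for k in range(3):
--                     for h in range(3,6):
--                         possible_move.append([h,k])
--                 return possible_move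
--
--     #coint haut droite
--     for i in range(0,7,3):
--         for j in range(2,9,3):
--             if (x,y) == (i,j):
--                 possible_move = []
--                 for k in range(3):
--                     for h in range(6,9):
--                         possible_move.append([h,k])
--                 return possible_move
--
--     #coint milleux gauche
--     for i in range(1,8,3):
--         for j in range(0,7,3):
--             if (x,y) == (i,j):
--                 possible_move = []
--                 for k in range(3,6):
--                     for h in range(3):
--                         possible_move.append([h,k])
--                 return possible_move
--
--     #coint milleux milleux
--     for i in range(1,8,3):
--         for j in range(1,8,3):
--             if (x,y) == (i,j):
--                 possible_move = []
--                 for k in range(3,6):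
--                     for h in range(3,6):
--                         possible_move.append([h,k])
--                 return possible_move
--
--     #coint milleux droite
--     for i in range(1,8,3):
--         for j in range(2,9,3):
--             if (x,y) == (i,j):
--                 possible_move = []
--                 for k in range(3,6):
--                     for h in range(6,9):
--                         possible_move.append([h,k])
--                 return possible_move
--
--     #coint bas gauche
--     for i in range(2,9,3):
--         for j in range(0,9,3):
--             if (x,y) == (i,j):
--                 possible_move = []
--                 for k in range(6,9):
--                     for h in range(3):
--                         possible_move.append([h,k])
--                 return possible_move
--
--     #coint bas milleux
--     for i in range(2,9,3):
--         for j in range(1,9,3):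
--             if (x,y) == (i,j):
--                 possible_move = []
--                 for k in range(6,9):
--                     for h in range(3,6):
--                         possible_move.append([h,k])
--                 return possible_move
--
--     #coint bas droite
--     for i in range(2,9,3):
--         for j in range(2,9,3):
--             if (x,y) == (i,j):
--                 possible_move = []
--                 for k in range(6,9):
--                     for h in range(6,9):
--                         possible_move.append([h,k])
--                 return possible_move
-- ===== SOURCE B (Python) =====
-- def get_next_box(x, y):
--     # direct modular block selection instead of nine sequential block scans
--     if x not in (0, 1, 2, 3, 4, 5, 6, 7, 8) or y not in (0, 1, 2, 3, 4, 5, 6, 7, 8):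
--         return None
--     rx = x % 3
--     ry = y % 3
--     return [[h, k] for k in range(3 * rx, 3 * rx + 3) for h in range(3 * ry, 3 * ry + 3)]
-- ===== Notes on version B (the rewrite author's own statement) =====
-- stated objective: simpler
-- what changed: Replaces A's nine sequential block scans (each a nested range membership search with its own hard-coded build loops) by a single guard plus modular arithmetic (x%3, y%3) that computes the block's coordinate ranges directly.
-- outside the precondition, e.g. on get_next_box(9, 0): A returns None, B returns None; on get_next_box(-3, 2): A returns None, B returns None
import Mathlib
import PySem

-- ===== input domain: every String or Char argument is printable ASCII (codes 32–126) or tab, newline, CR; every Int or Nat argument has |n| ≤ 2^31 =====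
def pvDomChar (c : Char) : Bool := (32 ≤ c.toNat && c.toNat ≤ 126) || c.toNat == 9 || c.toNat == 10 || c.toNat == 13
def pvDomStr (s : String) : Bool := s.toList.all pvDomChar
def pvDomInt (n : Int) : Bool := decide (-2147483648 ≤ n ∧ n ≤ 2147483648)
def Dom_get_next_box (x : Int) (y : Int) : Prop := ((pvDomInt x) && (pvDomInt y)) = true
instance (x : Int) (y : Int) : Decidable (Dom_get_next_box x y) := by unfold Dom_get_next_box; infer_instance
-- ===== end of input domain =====

-- B replaces A's nine sequential block scans by one modular block selection (objective: simpler).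

-- ===== PORT A =====
-- the inner 'for k: for h: possible_move.append([h,k])' build loops
def pvBuild (ks hs : List Int) : List (List Int) :=
  ks.foldl (fun acc k => hs.foldl (fun acc h => acc ++ [[h, k]]) acc) []

-- one 'for i in is: for j in js: if (x,y)==(i,j): return build' scan:
-- the early return fires iff x ∈ is and y ∈ js, and the returned value does not depend on which (i,j) matched
def pvBlock (x y : Int) (is js ks hs : List Int) : Option (List (List Int)) :=
  if is.contains x && js.contains y then some (pvBuild ks hs) else none

def get_next_box (x : Int) (y : Int) : List (List Int) :=
  ((pvBlock x y (PySem.List.pyRange 0 7 3) (PySem.List.pyRange 0 7 3) (PySem.List.pyRange 0 3 1) (PySem.List.pyRange 0 3 1)).orElse (fun _ =>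
   (pvBlock x y (PySem.List.pyRange 0 7 3) (PySem.List.pyRange 1 8 3) (PySem.List.pyRange 0 3 1) (PySem.List.pyRange 3 6 1)).orElse (fun _ =>
   (pvBlock x y (PySem.List.pyRange 0 7 3) (PySem.List.pyRange 2 9 3) (PySem.List.pyRange 0 3 1) (PySem.List.pyRange 6 9 1)).orElse (fun _ =>
   (pvBlock x y (PySem.List.pyRange 1 8 3) (PySem.List.pyRange 0 7 3) (PySem.List.pyRange 3 6 1) (PySem.List.pyRange 0 3 1)).orElse (fun _ =>
   (pvBlock x y (PySem.List.pyRange 1 8 3) (PySem.List.pyRange 1 8 3) (PySem.List.pyRange 3 6 1) (PySem.List.pyRange 3 6 1)).orElse (fun _ =>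
   (pvBlock x y (PySem.List.pyRange 1 8 3) (PySem.List.pyRange 2 9 3) (PySem.List.pyRange 3 6 1) (PySem.List.pyRange 6 9 1)).orElse (fun _ =>
   (pvBlock x y (PySem.List.pyRange 2 9 3) (PySem.List.pyRange 0 9 3) (PySem.List.pyRange 6 9 1) (PySem.List.pyRange 0 3 1)).orElse (fun _ =>
   (pvBlock x y (PySem.List.pyRange 2 9 3) (PySem.List.pyRange 1 9 3) (PySem.List.pyRange 6 9 1) (PySem.List.pyRange 3 6 1)).orElse (fun _ =>
   (pvBlock x y (PySem.List.pyRange 2 9 3) (PySem.List.pyRange 2 9 3) (PySem.List.pyRange 6 9 1) (PySem.List.pyRange 6 9 1))))))))))).getD []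

-- ===== PORT B =====
def get_next_box_alt (x : Int) (y : Int) : List (List Int) :=
  if !(([0, 1, 2, 3, 4, 5, 6, 7, 8] : List Int).contains x)
     || !(([0, 1, 2, 3, 4, 5, 6, 7, 8] : List Int).contains y) then []
  else
    let rx := PySem.Int.mod x 3
    let ry := PySem.Int.mod y 3
    (PySem.List.pyRange (3 * rx) (3 * rx + 3) 1).flatMap (fun k =>
      (PySem.List.pyRange (3 * ry) (3 * ry + 3) 1).map (fun h => [h, k]))

-- ===== PRECONDITION & SPEC =====
-- Pre_ excludes exactly the inputs outside the 9x9 board, where A falls through all scans and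
-- returns None, which is not a value of the declared list type (B returns None there too).
def Pre_get_next_box (x : Int) (y : Int) : Prop := 0 ≤ x ∧ x ≤ 8 ∧ 0 ≤ y ∧ y ≤ 8
instance (x : Int) (y : Int) : Decidable (Pre_get_next_box x y) := by unfold Pre_get_next_box; infer_instance
def pvWitness_get_next_box : Int × Int := (4, 7)

def Spec_get_next_box (x : Int) (y : Int) (out : List (List Int)) : Prop := out = get_next_box_alt x y
instance (x : Int) (y : Int) (out : List (List Int)) : Decidable (Spec_get_next_box x y out) := by unfold Spec_get_next_box; infer_instance

-- ===== CLAIM (what is proved, stated in full; the proofs are below) =====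
def Claim_equal_get_next_box : Prop := ∀ (x : Int) (y : Int), Dom_get_next_box x y → Pre_get_next_box x y → Spec_get_next_box x y (get_next_box x y)

-- ===== LEMMAS AND PROOFS =====

-- ===== VERDICT (by name: the statement is the Claim_ definition above) =====
theorem get_next_box_spec : Claim_equal_get_next_box := by
  intro x y _ hpre
  obtain ⟨hx0, hx8, hy0, hy8⟩ := hpre
  unfold Spec_get_next_box
  interval_cases x <;> interval_cases y <;> decide
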